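-- pv_equiv track=rewrite | github.com/ozan-k/deeperInference | BuildExhaustiveCode/s_maude.py | copar_join
-- ===== SOURCE A (Python) =====
-- def copar_join(lst):
-- 	result = ""
-- 	length = len(lst) - 1
-- 	for k,i in enumerate(lst):
-- 		if k < length:
-- 			result += "{ " + i + ", "
-- 		else:
-- 			result += i
-- 	for i in range(length):
-- 		result += " }"
-- 	return result
-- ===== SOURCE B (Python) =====
-- def copar_join(lst):
--     # Build the nested-brace string back-to-front in one pass:
--     # seed with the last element, then wrap each earlier element around it.
--     if not lst:
--         return ""
--     result = lst[-1]
--     for x in reversed(lst[:-1]):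
--         result = "{ " + x + ", " + result + " }"
--     return result
-- ===== Notes on version B (the rewrite author's own statement) =====
-- stated objective: simpler
-- what changed: Replaces A's two-pass scheme (one enumerate loop writing '{ x, ' prefixes plus a second range loop appending the ' }' closers) with a single reversed fold that seeds on the last element and wraps each earlier element in one step; samer output, but each step rebuilds the string, so B is slower on large lists.
import Mathlib
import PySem

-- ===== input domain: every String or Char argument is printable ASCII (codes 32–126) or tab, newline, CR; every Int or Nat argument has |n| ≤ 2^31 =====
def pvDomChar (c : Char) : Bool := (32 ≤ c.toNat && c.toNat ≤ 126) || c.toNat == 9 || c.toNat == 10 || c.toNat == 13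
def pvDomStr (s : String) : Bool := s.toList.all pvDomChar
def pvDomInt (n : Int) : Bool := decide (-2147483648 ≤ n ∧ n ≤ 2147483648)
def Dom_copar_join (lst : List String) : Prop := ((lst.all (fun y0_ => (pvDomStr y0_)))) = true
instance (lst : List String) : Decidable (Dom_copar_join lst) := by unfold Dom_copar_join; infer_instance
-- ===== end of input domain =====

-- B builds the nested-brace string in one reversed fold instead of A's two-pass
-- prefix-then-closers scheme; objective: simpler.

-- ===== PORT A =====
def copar_join (lst : List String) : String :=
  let length : Int := (lst.length : Int) - 1
  let result : String :=
    (PySem.List.enumerate lst 0).foldl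
      (fun result ki =>
        if ki.1 < length then result ++ ("{ " ++ ki.2 ++ ", ") else result ++ ki.2) ""
  (PySem.List.pyRange 0 length 1).foldl (fun result _ => result ++ " }") result

-- ===== PORT B =====
-- lst[:-1] is List.dropLast (exact for this nonempty-list use), lst[-1] the last
-- element; 'for x in reversed(lst[:-1])' is a foldl over the reversed list.
def copar_join_alt (lst : List String) : String :=
  match lst.getLast? with
  | none => ""
  | some last =>
      (lst.dropLast.reverse).foldl
        (fun result x => "{ " ++ x ++ ", " ++ result ++ " }") last

-- ===== PRECONDITION & SPEC =====
def Spec_copar_join (lst : List String) (out : String) : Prop := out = copar_join_alt lst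
instance (lst : List String) (out : String) : Decidable (Spec_copar_join lst out) := by unfold Spec_copar_join; infer_instance

-- ===== CLAIM (what is proved, stated in full; the proofs are below) =====
def Claim_equal_copar_join : Prop := ∀ (lst : List String), Dom_copar_join lst → Spec_copar_join lst (copar_join lst)

-- ===== LEMMAS AND PROOFS =====

-- the prefix fold of A, with enumerate offset s and threshold L
def pvPfx (xs : List String) (s L : Int) (acc : String) : String :=
  (PySem.List.enumerate xs s).foldl
    (fun result ki =>
      if ki.1 < L then result ++ ("{ " ++ ki.2 ++ ", ") else result ++ ki.2) acc

-- the closers block " }" * n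
def pvClose : Nat → String
  | 0 => ""
  | n + 1 => pvClose n ++ " }"

lemma pvPfx_cons (x : String) (xs : List String) (s L : Int) (acc : String) :
    pvPfx (x :: xs) s L acc =
      pvPfx xs (s + 1) L (if s < L then acc ++ ("{ " ++ x ++ ", ") else acc ++ x) := by
  simp [pvPfx, PySem.List.enumerate_cons]

lemma pvClose_comm (n : Nat) : pvClose n ++ " }" = " }" ++ pvClose n := by
  induction n with
  | zero => rfl
  | succ n ih => show pvClose n ++ " }" ++ " }" = _; rw [ih]; simp [pvClose, String.append_assoc, ih]

lemma pvCloseFold (l : List Int) (acc : String) :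
    l.foldl (fun result _ => result ++ " }") acc = acc ++ pvClose l.length := by
  induction l generalizing acc with
  | nil => simp [pvClose]
  | cons a l ih =>
      simp only [List.foldl_cons, ih, List.length_cons]
      show acc ++ " }" ++ pvClose l.length = _
      rw [String.append_assoc, ← pvClose_comm]; rfl

lemma pvPfx_shift (xs : List String) (s L : Int) (acc : String) :
    pvPfx xs (s + 1) (L + 1) acc = pvPfx xs s L acc := by
  induction xs generalizing s acc with
  | nil => rfl
  | cons x xs ih =>
      rw [pvPfx_cons, pvPfx_cons]
      have hc : (s + 1 < L + 1) = (s < L) := propext ⟨by omega, by omega⟩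
      simp only [hc]
      exact ih _ _

lemma pvPfx_acc (xs : List String) (s L : Int) (acc : String) :
    pvPfx xs s L acc = acc ++ pvPfx xs s L "" := by
  induction xs generalizing s acc with
  | nil => simp [pvPfx]
  | cons x xs ih =>
      rw [pvPfx_cons, pvPfx_cons]
      by_cases h : s < L
      · simp only [h, if_pos]
        rw [ih (s + 1) (acc ++ ("{ " ++ x ++ ", ")), ih (s + 1) ("" ++ ("{ " ++ x ++ ", "))]
        simp [String.append_assoc]
      · simp only [h, if_neg, not_false_iff]
        rw [ih (s + 1) (acc ++ x), ih (s + 1) ("" ++ x)]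
        simp [String.append_assoc]

lemma copar_join_eq (lst : List String) :
    copar_join lst =
      pvPfx lst 0 ((lst.length : Int) - 1) "" ++ pvClose ((lst.length : Int) - 1).toNat := by
  simp only [copar_join, pvPfx]
  rw [pvCloseFold, PySem.List.length_pyRange_one]
  norm_num

-- A's recurrence on lists of length >= 2
lemma copar_join_cons (x : String) (xs : List String) (h : xs ≠ []) :
    copar_join (x :: xs) = "{ " ++ x ++ ", " ++ copar_join xs ++ " }" := by
  have hn : 0 < xs.length := List.length_pos_iff.mpr h
  rw [copar_join_eq, copar_join_eq]
  have h1 : ((x :: xs).length : Int) - 1 = ((xs.length : Int) - 1) + 1 := by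
    simp only [List.length_cons]; push_cast; ring
  rw [h1, pvPfx_cons]
  have hlt : (0 : Int) < ((xs.length : Int) - 1) + 1 := by omega
  rw [if_pos hlt, pvPfx_shift, pvPfx_acc]
  have h3 : (((xs.length : Int) - 1) + 1).toNat = ((xs.length : Int) - 1).toNat + 1 := by omega
  rw [h3]
  simp [pvClose, String.append_assoc]

-- B's recurrence on lists of length >= 2
lemma copar_join_alt_cons (x : String) (xs : List String) (h : xs ≠ []) :
    copar_join_alt (x :: xs) = "{ " ++ x ++ ", " ++ copar_join_alt xs ++ " }" := by
  obtain ⟨y, ys, rfl⟩ := List.exists_cons_of_ne_nil h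
  cases hg : (y :: ys).getLast? with
  | none => simp at hg
  | some last =>
      have h1 : (x :: y :: ys).getLast? = some last := by
        rw [List.getLast?_cons_cons]; exact hg
      simp only [copar_join_alt, h1, hg]
      rw [show (x :: y :: ys).dropLast = x :: (y :: ys).dropLast from rfl,
          List.reverse_cons, List.foldl_append, List.foldl_cons, List.foldl_nil]

lemma copar_main (lst : List String) : copar_join lst = copar_join_alt lst := by
  induction lst with
  | nil => rfl
  | cons x xs ih =>
      cases xs with
      | nil =>
          rw [copar_join_eq]
          simp [pvPfx, pvClose, copar_join_alt, PySem.List.enumerate_cons]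
      | cons y ys =>
          rw [copar_join_cons x (y :: ys) (by simp),
              copar_join_alt_cons x (y :: ys) (by simp), ih]

-- ===== VERDICT (by name: the statement is the Claim_ definition above) =====
theorem copar_join_spec : Claim_equal_copar_join := by
  intro lst _
  exact copar_main lst
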